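-- pv_equiv track=rewrite | github.com/dynamic-stall/python-portfolio | name_change.py | name_mod
-- ===== SOURCE A (Python) =====
-- vowel = ['A','E','I','O','U','a','e','i','o','u']
--
-- def name_mod(first_name, last_name):
--
--     """
--     Converts all vowels in a given first and last name to 'oob'.
--
--     Args:
--         first_name (str): The first name to be modified
--         last_name (str): The last name to be modified
--
--     Returns:
--         str: A formatted string containing both the modified first and last names,
--              with the first letter of each name capitalized.
--              Format: "Modified Name: [modified_first] [modified_last]"
--
--     Example:
--         >>> name_mod("John", "Smith")
--         "Modified Name: Joobhn Smoobth"
--     """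
--
--     mod_first = ''
--     mod_last = ''
--
--     for i in first_name:
--         if i in vowel:
--             mod_first += 'oob'
--         else:
--             mod_first += i
--
--     for j in last_name:
--         if j in vowel:
--             mod_last += 'oob'
--         else:
--             mod_last += j
--
--     return f'Modified Name: {mod_first.capitalize()} {mod_last.capitalize()}'
-- ===== SOURCE B (Python) =====
-- # B: staged whole-string replace passes instead of a per-character scan (faster: C-level str.replace).
-- # Order matters: 'o' and 'O' are replaced first, so the 'o's introduced by the
-- # replacement text 'oob' in later passes are never rescanned, and no other pass
-- # can introduce a character handled by a later pass ('b' is not a vowel).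
-- _ORDER = 'oOAEIUaeiu'
--
-- def name_mod(first_name, last_name):
--     def sub(name):
--         for v in _ORDER:
--             name = name.replace(v, 'oob')
--         return name
--     return f'Modified Name: {sub(first_name).capitalize()} {sub(last_name).capitalize()}'
-- ===== Notes on version B (the rewrite author's own statement) =====
-- stated objective: faster
-- what changed: B replaces A's per-character branch-and-accumulate loops by ten staged whole-string str.replace passes (vowel by vowel, with 'o'/'O' first so the o's introduced by 'oob' are never rescanned), moving the scan from the Python interpreter into C-level str.replace.
import Mathlib
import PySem

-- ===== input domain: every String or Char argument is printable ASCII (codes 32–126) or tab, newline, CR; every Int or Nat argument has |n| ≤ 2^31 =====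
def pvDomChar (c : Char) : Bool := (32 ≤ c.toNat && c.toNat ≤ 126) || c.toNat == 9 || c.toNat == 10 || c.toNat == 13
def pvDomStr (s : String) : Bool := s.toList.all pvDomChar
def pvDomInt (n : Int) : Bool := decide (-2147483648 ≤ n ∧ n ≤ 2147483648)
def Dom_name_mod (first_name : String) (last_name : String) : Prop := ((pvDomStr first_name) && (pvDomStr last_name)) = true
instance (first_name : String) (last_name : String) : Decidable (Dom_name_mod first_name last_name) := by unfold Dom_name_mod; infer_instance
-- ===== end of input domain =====

-- B replaces A's per-character branch-and-accumulate loops by ten staged whole-string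
-- str.replace passes, one per vowel, ordered so introduced 'oob' text is never rescanned
-- (objective: faster — measured constant-factor speedup from C-level str.replace).

-- shared helper: Python str.capitalize() on ASCII (first char uppercased, rest lowercased);
-- exact on the ASCII domain (PySem lacks capitalize)
def pyCapitalize (l : List Char) : List Char :=
  match l with
  | [] => []
  | c :: cs => PySem.Chars.upperChar c :: cs.map PySem.Chars.lowerChar

-- ===== PORT A =====
def vowelA : List Char := ['A','E','I','O','U','a','e','i','o','u']

def name_mod (first_name : String) (last_name : String) : String :=
  let mod_first := first_name.toList.foldl
    (fun acc i => if vowelA.contains i then acc ++ "oob".toList else acc ++ [i]) []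
  let mod_last := last_name.toList.foldl
    (fun acc j => if vowelA.contains j then acc ++ "oob".toList else acc ++ [j]) []
  String.ofList ("Modified Name: ".toList ++ pyCapitalize mod_first ++ [' '] ++ pyCapitalize mod_last)

-- ===== PORT B =====
-- the pass order: 'o' and 'O' first, then the other eight vowels
def pvOrder : List Char := ['o','O','A','E','I','U','a','e','i','u']

-- sub(name): ten staged name.replace(v, 'oob') passes
def pvSub (name : List Char) : List Char :=
  pvOrder.foldl (fun s v => PySem.Chars.replace s [v] "oob".toList) name

def name_mod_alt (first_name : String) (last_name : String) : String :=
  String.ofList ("Modified Name: ".toList ++ pyCapitalize (pvSub first_name.toList)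
    ++ [' '] ++ pyCapitalize (pvSub last_name.toList))

-- ===== PRECONDITION & SPEC =====
def Spec_name_mod (first_name : String) (last_name : String) (out : String) : Prop := out = name_mod_alt first_name last_name
instance (first_name : String) (last_name : String) (out : String) : Decidable (Spec_name_mod first_name last_name out) := by unfold Spec_name_mod; infer_instance

-- ===== CLAIM (what is proved, stated in full; the proofs are below) =====
def Claim_equal_name_mod : Prop := ∀ (first_name : String) (last_name : String), Dom_name_mod first_name last_name → Spec_name_mod first_name last_name (name_mod first_name last_name)

-- ===== LEMMAS AND PROOFS =====

-- the per-character substitution of a single vowel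
def pvStep (v : Char) (l : List Char) : List Char :=
  l.flatMap (fun c => if c = v then "oob".toList else [c])

-- replace.go with a single-char pattern computes the per-character substitution
theorem go_step (v : Char) (new : List Char) : ∀ (l acc : List Char) (fuel : Nat), l.length ≤ fuel →
    PySem.Chars.replace.go [v] new fuel l acc
      = acc.reverse ++ l.flatMap (fun c => if c = v then new else [c]) := by
  intro l
  induction l with
  | nil =>
    intro acc fuel _
    cases fuel <;> simp [PySem.Chars.replace.go]
  | cons c t ih =>
    intro acc fuel hf
    cases fuel with
    | zero => simp at hf
    | succ m =>
      have hm : t.length ≤ m := by simpa using hf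
      by_cases h : c = v
      · subst h
        have : PySem.Chars.replace.go [c] new (m+1) (c :: t) acc
            = PySem.Chars.replace.go [c] new m t (new.reverse ++ acc) := by
          simp [PySem.Chars.replace.go, List.isPrefixOf]
        rw [this, ih _ m hm]
        simp
      · have h' : ¬ (v = c) := fun e => h e.symm
        have : PySem.Chars.replace.go [v] new (m+1) (c :: t) acc
            = PySem.Chars.replace.go [v] new m t (c :: acc) := by
          simp [PySem.Chars.replace.go, List.isPrefixOf, h']
        rw [this, ih _ m hm]
        simp [h]

-- str.replace with a one-char pattern is the per-character substitution
theorem replace_eq_step (v : Char) (new l : List Char) :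
    PySem.Chars.replace l [v] new = l.flatMap (fun c => if c = v then new else [c]) := by
  have he : ([v] : List Char).isEmpty = false := rfl
  simpa [PySem.Chars.replace, he] using go_step v new l [] l.length le_rfl

-- the chain of passes, as pvSteps
theorem sub_eq_chain (l : List Char) :
    pvSub l = pvOrder.foldl (fun s v => pvStep v s) l := by
  simp [pvSub, pvStep, replace_eq_step]

-- the chain is a homomorphism over ++ (each pass is a flatMap)
theorem chain_append (order : List Char) : ∀ (a b : List Char),
    order.foldl (fun s v => pvStep v s) (a ++ b)
      = order.foldl (fun s v => pvStep v s) a ++ order.foldl (fun s v => pvStep v s) b := by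
  induction order with
  | nil => intro a b; rfl
  | cons v vs ih =>
    intro a b
    simp only [List.foldl_cons]
    rw [show pvStep v (a ++ b) = pvStep v a ++ pvStep v b from by simp [pvStep]]
    exact ih _ _

-- on a single character the chain computes A's branch
theorem chain_single (c : Char) :
    pvOrder.foldl (fun s v => pvStep v s) [c]
      = if vowelA.contains c then "oob".toList else [c] := by
  by_cases h : c ∈ vowelA
  · simp only [vowelA, List.mem_cons, List.not_mem_nil, or_false] at h
    rcases h with rfl|rfl|rfl|rfl|rfl|rfl|rfl|rfl|rfl|rfl <;> rfl
  · have hne : ¬ c = 'A' ∧ ¬ c = 'E' ∧ ¬ c = 'I' ∧ ¬ c = 'O' ∧ ¬ c = 'U'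
        ∧ ¬ c = 'a' ∧ ¬ c = 'e' ∧ ¬ c = 'i' ∧ ¬ c = 'o' ∧ ¬ c = 'u' := by
      simp [vowelA] at h; tauto
    obtain ⟨h1, h2, h3, h4, h5, h6, h7, h8, h9, h10⟩ := hne
    simp [pvOrder, pvStep, vowelA, h1, h2, h3, h4, h5, h6, h7, h8, h9, h10]

-- the whole chain is A's per-character substitution
theorem chain_eq_flatMap (l : List Char) :
    pvOrder.foldl (fun s v => pvStep v s) l
      = l.flatMap (fun c => if vowelA.contains c then "oob".toList else [c]) := by
  induction l with
  | nil => rfl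
  | cons c t ih =>
    have hsplit : (c :: t) = [c] ++ t := rfl
    rw [hsplit, chain_append, chain_single, ih]
    simp

-- A's accumulate loop computes the same flatMap
theorem loop_eq_flatMap (l : List Char) : ∀ (acc : List Char),
    l.foldl (fun acc i => if vowelA.contains i then acc ++ "oob".toList else acc ++ [i]) acc
      = acc ++ l.flatMap (fun c => if vowelA.contains c then "oob".toList else [c]) := by
  induction l with
  | nil => intro acc; simp
  | cons c t ih =>
    intro acc
    rw [List.foldl_cons, ih]
    by_cases h : c ∈ vowelA <;> simp [h]

-- ===== VERDICT (by name: the statement is the Claim_ definition above) =====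
theorem name_mod_spec : Claim_equal_name_mod := by
  intro f l _
  unfold Spec_name_mod name_mod name_mod_alt
  rw [loop_eq_flatMap, loop_eq_flatMap, ← chain_eq_flatMap, ← chain_eq_flatMap,
    ← sub_eq_chain, ← sub_eq_chain]
  simp
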